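-- pv_equiv track=rewrite | github.com/florianlanger/SPARC | SPARC/evaluate/scannet/scan2cad_constraint.py | number_per_model_to_number_per_category
-- ===== SOURCE A (Python) =====
-- def number_per_model_to_number_per_category(dic):
--     new_dict = {}
--     for key in dic:
--         cat_id = key.split('_')[0]
--         if cat_id in new_dict:
--             new_dict[cat_id] += dic[key]
--         else:
--             new_dict[cat_id] = dic[key]
--     return new_dict
-- ===== SOURCE B (Python) =====
-- def number_per_model_to_number_per_category(dic):
--     groups = {}
--     for k in dic:
--         groups.setdefault(k.split('_')[0], []).append(dic[k])
--     return {c: sum(vs) for c, vs in groups.items()}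
-- ===== Notes on version B (the rewrite author's own statement) =====
-- stated objective: alternative
-- what changed: Instead of A's membership-tested running sums, B groups the values into per-category lists (setdefault/append) in one pass and then reduces each group with sum in a second pass.
import Mathlib
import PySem

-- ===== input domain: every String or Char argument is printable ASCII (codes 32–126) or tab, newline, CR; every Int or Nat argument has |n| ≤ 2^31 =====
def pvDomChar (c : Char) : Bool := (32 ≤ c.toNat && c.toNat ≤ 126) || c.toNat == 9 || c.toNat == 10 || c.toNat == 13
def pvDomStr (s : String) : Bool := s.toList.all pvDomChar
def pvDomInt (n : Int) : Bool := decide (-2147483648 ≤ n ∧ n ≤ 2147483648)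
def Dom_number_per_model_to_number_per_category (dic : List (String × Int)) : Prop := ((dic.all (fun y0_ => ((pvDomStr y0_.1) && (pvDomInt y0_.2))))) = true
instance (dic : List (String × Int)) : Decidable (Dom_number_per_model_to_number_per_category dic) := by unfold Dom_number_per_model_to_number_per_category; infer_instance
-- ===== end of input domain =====

-- B replaces A's membership-tested running sums by "group the values into per-category lists, then sum each group";
-- same values, a different (not faster) decomposition.

-- key.split('_')[0]  (split? never returns none for sep = "_", and never an empty list, so the defaults are inert)
def pvCat (key : String) : String :=
  (PySem.List.pyGet? ((PySem.Str.split? key "_").getD []) 0).getD ""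

-- dic[key]  (keys looked up always come from dic itself, so the default 0 is inert)
def pvLook (dic : List (String × Int)) (key : String) : Int :=
  ((PySem.Dict.mk dic).get? key).getD 0

-- ===== PORT A =====
def number_per_model_to_number_per_category (dic : List (String × Int)) : List (String × Int) :=
  (dic.foldl (fun nd kv =>
      if nd.contains (pvCat kv.1) then
        nd.insert (pvCat kv.1) ((nd.get? (pvCat kv.1)).getD 0 + pvLook dic kv.1)
      else
        nd.insert (pvCat kv.1) (pvLook dic kv.1))
    PySem.Dict.empty).items

-- ===== PORT B =====
def number_per_model_to_number_per_category_alt (dic : List (String × Int)) : List (String × Int) :=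
  ((dic.foldl (fun g kv =>
      g.modify (pvCat kv.1) [] (fun vs => vs ++ [pvLook dic kv.1])) PySem.Dict.empty).items).map
    (fun cv => (cv.1, cv.2.sum))

-- ===== PRECONDITION & SPEC =====
def Spec_number_per_model_to_number_per_category (dic : List (String × Int)) (out : List (String × Int)) : Prop := out = number_per_model_to_number_per_category_alt dic
instance (dic : List (String × Int)) (out : List (String × Int)) : Decidable (Spec_number_per_model_to_number_per_category dic out) := by unfold Spec_number_per_model_to_number_per_category; infer_instance

-- ===== CLAIM (what is proved, stated in full; the proofs are below) =====
def Claim_equal_number_per_model_to_number_per_category : Prop := ∀ (dic : List (String × Int)), Dom_number_per_model_to_number_per_category dic → Spec_number_per_model_to_number_per_category dic (number_per_model_to_number_per_category dic)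

-- ===== LEMMAS AND PROOFS =====

-- A's loop body always inserts at pvCat kv.1; pull the branch inside the inserted value.
theorem pvStep_eq (dic : List (String × Int)) :
    (fun (nd : PySem.Dict String Int) (kv : String × Int) =>
      if nd.contains (pvCat kv.1) then
        nd.insert (pvCat kv.1) ((nd.get? (pvCat kv.1)).getD 0 + pvLook dic kv.1)
      else
        nd.insert (pvCat kv.1) (pvLook dic kv.1))
    = fun nd kv => nd.insert (pvCat kv.1)
        (if nd.contains (pvCat kv.1) then (nd.get? (pvCat kv.1)).getD 0 + pvLook dic kv.1
         else pvLook dic kv.1) := by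
  funext nd kv
  by_cases h : nd.contains (pvCat kv.1) <;> simp [h]

-- loop invariant: the accumulated count at category c
theorem pvGetD_fold (dic : List (String × Int)) (l : List (String × Int)) (c : String) :
    ∀ d : PySem.Dict String Int,
      (l.foldl (fun nd kv =>
          if nd.contains (pvCat kv.1) then
            nd.insert (pvCat kv.1) ((nd.get? (pvCat kv.1)).getD 0 + pvLook dic kv.1)
          else
            nd.insert (pvCat kv.1) (pvLook dic kv.1)) d).getD c 0
        = d.getD c 0 + ((l.filter (fun kv => pvCat kv.1 == c)).map (fun kv => pvLook dic kv.1)).sum := by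
  induction l with
  | nil => intro d; simp
  | cons x l ih =>
    intro d
    rw [List.foldl_cons, ih]
    by_cases hcont : d.contains (pvCat x.1) = true
    · rw [if_pos hcont]
      by_cases hc : pvCat x.1 = c
      · subst hc
        rw [PySem.Dict.getD_insert, if_pos rfl, ← PySem.Dict.getD_eq_get?_getD]
        simp
        ring
      · rw [PySem.Dict.getD_insert, if_neg (Ne.symm hc)]
        simp [hc]
    · rw [if_neg hcont]
      by_cases hc : pvCat x.1 = c
      · subst hc
        rw [PySem.Dict.getD_insert, if_pos rfl]
        have h0 : d.getD (pvCat x.1) 0 = 0 :=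
          PySem.Dict.getD_of_not_contains d 0 (by simpa using hcont)
        rw [h0]
        simp
      · rw [PySem.Dict.getD_insert, if_neg (Ne.symm hc)]
        simp [hc]

theorem pvKeys_fold (dic : List (String × Int)) :
    (dic.foldl (fun nd kv =>
        if nd.contains (pvCat kv.1) then
          nd.insert (pvCat kv.1) ((nd.get? (pvCat kv.1)).getD 0 + pvLook dic kv.1)
        else
          nd.insert (pvCat kv.1) (pvLook dic kv.1)) PySem.Dict.empty).keys
      = PySem.List.dedup (dic.map (fun kv => pvCat kv.1)) := by
  rw [pvStep_eq, PySem.Dict.keys_foldl_insert_key]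
  simp [PySem.Dict.keys_empty, PySem.List.dedup_eq_ofList, PySem.Set.update,
        PySem.Set.ofList]

theorem pvNodup_fold (dic : List (String × Int)) :
    (dic.foldl (fun nd kv =>
        if nd.contains (pvCat kv.1) then
          nd.insert (pvCat kv.1) ((nd.get? (pvCat kv.1)).getD 0 + pvLook dic kv.1)
        else
          nd.insert (pvCat kv.1) (pvLook dic kv.1)) PySem.Dict.empty).keys.Nodup := by
  rw [pvStep_eq]
  exact PySem.Dict.nodup_keys_foldl_insert_key _ _ _ _ PySem.Dict.nodup_keys_empty

-- B's grouping fold, fused through List.foldl_map into the shape of the library grouping lemmas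
theorem pvGroups_eq (dic : List (String × Int)) :
    dic.foldl (fun g kv =>
        g.modify (pvCat kv.1) [] (fun vs => vs ++ [pvLook dic kv.1])) PySem.Dict.empty
      = (dic.map (fun kv => (pvCat kv.1, pvLook dic kv.1))).foldl
          (fun g p => g.modify p.1 [] (fun vs => vs ++ [p.2])) PySem.Dict.empty := by
  rw [List.foldl_map]

-- B equals the canonical "one pair per distinct category, with its filtered sum" form
theorem pvAltB_eq (dic : List (String × Int)) :
    number_per_model_to_number_per_category_alt dic
      = (PySem.List.dedup (dic.map (fun kv => pvCat kv.1))).map (fun c =>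
          (c, ((dic.filter (fun kv => pvCat kv.1 == c)).map (fun kv => pvLook dic kv.1)).sum)) := by
  unfold number_per_model_to_number_per_category_alt
  rw [pvGroups_eq]
  have hnd : ((dic.map (fun kv => (pvCat kv.1, pvLook dic kv.1))).foldl
      (fun g p => g.modify p.1 [] (fun vs => vs ++ [p.2])) PySem.Dict.empty).keys.Nodup :=
    PySem.Dict.nodup_keys_foldl_modify_key (dic.map (fun kv => (pvCat kv.1, pvLook dic kv.1)))
      (fun p => p.1) [] (fun g p => fun vs => vs ++ [p.2]) PySem.Dict.empty
      PySem.Dict.nodup_keys_empty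
  rw [PySem.Dict.items_eq_map_keys _ hnd []]
  rw [PySem.Dict.keys_foldl_modify_key (dic.map (fun kv => (pvCat kv.1, pvLook dic kv.1)))
      (fun p => p.1) [] (fun g p => fun vs => vs ++ [p.2]) PySem.Dict.empty]
  rw [List.map_map, List.map_map]
  refine List.map_congr_left fun c _ => ?_
  simp only [Function.comp_def]
  rw [Prod.mk.injEq]
  refine ⟨rfl, ?_⟩
  rw [PySem.Dict.getD_foldl_modify_append]
  simp [List.filter_map, Function.comp_def, List.map_map]

-- ===== VERDICT (by name: the statement is the Claim_ definition above) =====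
theorem number_per_model_to_number_per_category_spec : Claim_equal_number_per_model_to_number_per_category := by
  intro dic _
  unfold Spec_number_per_model_to_number_per_category
  rw [pvAltB_eq]
  unfold number_per_model_to_number_per_category
  rw [PySem.Dict.items_eq_map_keys _ (pvNodup_fold dic) 0, pvKeys_fold]
  refine List.map_congr_left fun c _ => ?_
  rw [pvGetD_fold dic dic c PySem.Dict.empty]
  simp
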